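-- pv_equiv track=rewrite | github.com/sdss/sdss_solara | sdss_solara/pages/jdaviz_embed.py | sort_filemap
-- ===== SOURCE A (Python) =====
-- def sort_filemap(data: dict) -> dict:
--     """ Sort the filemap by file preference """
--     prefs = ['mwmStar', 'spec', 'apStar']
--     prior = dict(zip(prefs, range(len(prefs))))
--
--     def get_prior(x):
--         for i in prefs:
--             if x.startswith(i):
--                 return prior[i]
--         return float('inf')
--
--     skeys = sorted(data.keys(), key=get_prior)
--     return {key: data[key] for key in skeys}
-- ===== SOURCE B (Python) =====
-- def sort_filemap(data: dict) -> dict: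
--     """ Sort the filemap by file preference (bucket partition, no comparison sort) """
--     prefs = ['mwmStar', 'spec', 'apStar']
--     buckets = [[], [], [], []]          # one bucket per preference, last one for "no match"
--     for key, value in data.items():
--         for idx, p in enumerate(prefs):
--             if key.startswith(p):
--                 buckets[idx].append((key, value))
--                 break
--         else:
--             buckets[3].append((key, value))
--     return {k: v for b in buckets for k, v in b}
-- ===== Notes on version B (the rewrite author's own statement) =====
-- stated objective: alternative
-- what changed: Replaces the key-function comparison sort plus rebuild-by-lookup with a single stable bucket partition of the items into four preference buckets concatenated in order.
import Mathlib
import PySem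

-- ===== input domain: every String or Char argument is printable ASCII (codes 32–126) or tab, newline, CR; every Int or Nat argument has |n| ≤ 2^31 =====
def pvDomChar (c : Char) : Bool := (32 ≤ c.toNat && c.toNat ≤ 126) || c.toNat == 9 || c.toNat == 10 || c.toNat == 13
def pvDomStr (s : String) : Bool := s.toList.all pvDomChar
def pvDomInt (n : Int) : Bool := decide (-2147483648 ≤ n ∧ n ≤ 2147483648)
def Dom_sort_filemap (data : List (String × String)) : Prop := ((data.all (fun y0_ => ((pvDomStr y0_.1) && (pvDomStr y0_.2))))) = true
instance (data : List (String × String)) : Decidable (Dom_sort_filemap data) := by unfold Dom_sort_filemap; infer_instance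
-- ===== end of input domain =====

-- B replaces A's comparison sort by key with a one-pass partition into four preference
-- buckets concatenated in order (alternative decomposition, same result).
-- The dict parameter is modelled as PySem.Dict.ofList data in both ports.

-- ===== PORT A =====
-- prefs = ['mwmStar', 'spec', 'apStar']
def pvPrefs : List String := ["mwmStar", "spec", "apStar"]
-- prior = dict(zip(prefs, range(len(prefs))))
def pvPrior : PySem.Dict String Int :=
  PySem.Dict.ofList (List.zip pvPrefs (PySem.List.pyRange 0 (pvPrefs.length : Int) 1))
-- get_prior: Python returns float('inf') for an unmatched key; every finite priority is 0..2,
-- so the sentinel 3 is order-exact.  prior[i] always hits (i ∈ prefs), so getD is exact.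
def pvGetPriorGo (x : String) : List String → Int
  | [] => 3
  | i :: rest => if PySem.Str.startswith x i then pvPrior.getD i 0 else pvGetPriorGo x rest
def pvGetPrior (x : String) : Int := pvGetPriorGo x pvPrefs

def sort_filemap (data : List (String × String)) : List (String × String) :=
  let d := PySem.Dict.ofList data
  let skeys := PySem.List.sorted d.keys pvGetPrior false
  -- {key: data[key] for key in skeys} (data[key] never misses: key ∈ data.keys)
  (skeys.foldl (fun acc k => acc.insert k (d.getD k "")) PySem.Dict.empty).items

-- ===== PORT B =====
-- index of the first matching prefix, 3 = "no match" (the for/else with enumerate)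
def altCatGo (k : String) : List String → Nat → Nat
  | [], _ => 3
  | p :: rest, idx => if PySem.Str.startswith k p then idx else altCatGo k rest (idx + 1)
def altCat (k : String) : Nat := altCatGo k ["mwmStar", "spec", "apStar"] 0

def altStep (b : List (String × String) × List (String × String) × List (String × String) × List (String × String))
    (p : String × String) :
    List (String × String) × List (String × String) × List (String × String) × List (String × String) :=
  let c := altCat p.1
  if c = 0 then (b.1 ++ [p], b.2.1, b.2.2.1, b.2.2.2)
  else if c = 1 then (b.1, b.2.1 ++ [p], b.2.2.1, b.2.2.2)
  else if c = 2 then (b.1, b.2.1, b.2.2.1 ++ [p], b.2.2.2)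
  else (b.1, b.2.1, b.2.2.1, b.2.2.2 ++ [p])

-- the buckets carry pairwise-distinct keys, so Source B's final dict comprehension keeps
-- exactly the concatenation order: ported as the concatenation of the buckets
def sort_filemap_alt (data : List (String × String)) : List (String × String) :=
  let bs := (PySem.Dict.ofList data).items.foldl altStep ([], [], [], [])
  bs.1 ++ bs.2.1 ++ bs.2.2.1 ++ bs.2.2.2

-- ===== PRECONDITION & SPEC =====
def Spec_sort_filemap (data : List (String × String)) (out : List (String × String)) : Prop := out = sort_filemap_alt data
instance (data : List (String × String)) (out : List (String × String)) : Decidable (Spec_sort_filemap data out) := by unfold Spec_sort_filemap; infer_instance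

-- ===== CLAIM (what is proved, stated in full; the proofs are below) =====
def Claim_equal_sort_filemap : Prop := ∀ (data : List (String × String)), Dom_sort_filemap data → Spec_sort_filemap data (sort_filemap data)

-- ===== LEMMAS AND PROOFS =====

lemma altCat_chain (k : String) :
    altCat k = if PySem.Str.startswith k "mwmStar" then 0
      else if PySem.Str.startswith k "spec" then 1
      else if PySem.Str.startswith k "apStar" then 2 else 3 := by
  simp only [altCat, altCatGo]

lemma pvGetPrior_eq_cast (k : String) : pvGetPrior k = (altCat k : Int) := by
  rw [altCat_chain]
  simp only [pvGetPrior, pvPrefs, pvGetPriorGo]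
  split_ifs <;> rfl

lemma altCat_le (k : String) : altCat k ≤ 3 := by
  rw [altCat_chain]; split_ifs <;> omega

lemma insertBy_skip {α : Type} (before : α → α → Bool) (x : α) (pre suf : List α)
    (h : ∀ y ∈ pre, before x y = false) :
    PySem.List.insertBy before x (pre ++ suf) = pre ++ PySem.List.insertBy before x suf := by
  induction pre with
  | nil => simp
  | cons a t ih =>
    have ha : before x a = false := h a (by simp)
    simp only [List.cons_append, PySem.List.insertBy, ha, Bool.false_eq_true, if_false]
    rw [ih (fun y hy => h y (by simp [hy]))]

lemma insertBy_front {α : Type} (before : α → α → Bool) (x : α) (suf : List α)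
    (h : ∀ y ∈ suf, before x y = true) :
    PySem.List.insertBy before x suf = x :: suf := by
  cases suf with
  | nil => rfl
  | cons a t => simp [PySem.List.insertBy, h a (by simp)]

lemma key_of_mem_filter {α : Type} (key : α → Int) (i : Int) (xs : List α) (y : α)
    (h : y ∈ xs.filter (fun a => key a == i)) : key y = i := by
  have := List.of_mem_filter h
  exact eq_of_beq this

lemma sorted_four {α : Type} (key : α → Int) (xs : List α)
    (h : ∀ x ∈ xs, key x = 0 ∨ key x = 1 ∨ key x = 2 ∨ key x = 3) :
    PySem.List.sorted xs key false =
      xs.filter (fun a => key a == 0) ++ xs.filter (fun a => key a == 1) ++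
      xs.filter (fun a => key a == 2) ++ xs.filter (fun a => key a == 3) := by
  induction xs using List.reverseRecOn with
  | nil => rfl
  | append_singleton xs x ih =>
    have hxs : ∀ y ∈ xs, key y = 0 ∨ key y = 1 ∨ key y = 2 ∨ key y = 3 :=
      fun y hy => h y (by simp [hy])
    have hx := h x (by simp)
    rw [PySem.List.sorted_eq_foldl_insertBy, List.foldl_append, List.foldl_cons, List.foldl_nil,
      ← PySem.List.sorted_eq_foldl_insertBy, ih hxs]
    simp only [List.filter_append, List.filter_cons, List.filter_nil]
    have m0 := key_of_mem_filter key 0 xs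
    have m1 := key_of_mem_filter key 1 xs
    have m2 := key_of_mem_filter key 2 xs
    have m3 := key_of_mem_filter key 3 xs
    rcases hx with hx | hx | hx | hx <;> rw [hx] <;> simp only [List.append_assoc]
    · rw [insertBy_skip _ _ _ _ (fun y hy => by simp [m0 y hy, hx]),
        insertBy_front]
      · simp
      · intro y hy
        simp only [List.mem_append] at hy
        rcases hy with hy | hy | hy
        · simp [m1 y hy, hx]
        · simp [m2 y hy, hx]
        · simp [m3 y hy, hx]
    · rw [insertBy_skip _ _ _ _ (fun y hy => by simp [m0 y hy, hx]),
        insertBy_skip _ _ _ _ (fun y hy => by simp [m1 y hy, hx]),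
        insertBy_front]
      · simp
      · intro y hy
        simp only [List.mem_append] at hy
        rcases hy with hy | hy
        · simp [m2 y hy, hx]
        · simp [m3 y hy, hx]
    · rw [insertBy_skip _ _ _ _ (fun y hy => by simp [m0 y hy, hx]),
        insertBy_skip _ _ _ _ (fun y hy => by simp [m1 y hy, hx]),
        insertBy_skip _ _ _ _ (fun y hy => by simp [m2 y hy, hx]),
        insertBy_front _ _ _ (fun y hy => by simp [m3 y hy, hx])]
      simp
    · rw [insertBy_skip _ _ _ _ (fun y hy => by simp [m0 y hy, hx]),
        insertBy_skip _ _ _ _ (fun y hy => by simp [m1 y hy, hx]),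
        insertBy_skip _ _ _ _ (fun y hy => by simp [m2 y hy, hx]),
        PySem.List.insertBy_of_forall_not_before _ _ _ (fun y hy => by simp [m3 y hy, hx])]
      simp

lemma bucket_fold (l : List (String × String))
    (b0 b1 b2 b3 : List (String × String)) :
    l.foldl altStep (b0, b1, b2, b3) =
      (b0 ++ l.filter (fun p => altCat p.1 == 0), b1 ++ l.filter (fun p => altCat p.1 == 1),
       b2 ++ l.filter (fun p => altCat p.1 == 2), b3 ++ l.filter (fun p => altCat p.1 == 3)) := by
  induction l generalizing b0 b1 b2 b3 with
  | nil => simp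
  | cons p t ih =>
    have hle := altCat_le p.1
    have h4 : altCat p.1 = 0 ∨ altCat p.1 = 1 ∨ altCat p.1 = 2 ∨ altCat p.1 = 3 := by omega
    rcases h4 with hc | hc | hc | hc <;>
      simp [List.foldl_cons, altStep, hc, ih, List.append_assoc]

lemma beq_cast_nat (n m : Nat) : (((n : Int) == (m : Int))) = (n == m) := by
  simp

theorem sort_filemap_eq_alt (data : List (String × String)) :
    sort_filemap data = sort_filemap_alt data := by
  unfold sort_filemap sort_filemap_alt
  set dd := PySem.Dict.ofList data with hdd
  have hnd : dd.keys.Nodup := PySem.Dict.nodup_keys_ofList data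
  -- A's dict comprehension is a map over skeys
  set skeys := PySem.List.sorted dd.keys pvGetPrior false with hsk
  have hperm : skeys.Perm dd.keys := PySem.List.sorted_perm dd.keys pvGetPrior false
  have hsknd : skeys.Nodup := hperm.nodup_iff.mpr hnd
  have hitems :
      (skeys.foldl (fun acc k => acc.insert k (dd.getD k "")) PySem.Dict.empty).items =
        skeys.map (fun k => (k, dd.getD k "")) := by
    have := PySem.Dict.items_foldl_insert_fresh skeys (fun a => a) (fun a => dd.getD a "")
      PySem.Dict.empty (fun a _ => PySem.Dict.contains_empty a) (by simpa using hsknd)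
    simpa using this
  rw [hitems]
  -- A's stable sort is the concatenation of the four key-buckets
  have hkeyvals : ∀ x ∈ dd.keys, pvGetPrior x = 0 ∨ pvGetPrior x = 1 ∨ pvGetPrior x = 2 ∨ pvGetPrior x = 3 := by
    intro x _
    have := altCat_le x
    rw [pvGetPrior_eq_cast]
    omega
  rw [hsk, sorted_four pvGetPrior dd.keys hkeyvals]
  -- B's fold is the concatenation of the four item-buckets
  rw [bucket_fold]
  simp only [List.nil_append, List.map_append]
  -- per-bucket: mapping back the values turns a key-bucket into the item-bucket
  have per : ∀ i : Nat,
      (dd.keys.filter (fun a => pvGetPrior a == (i : Int))).map (fun k => (k, dd.getD k "")) =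
        dd.items.filter (fun p => altCat p.1 == i) := by
    intro i
    have hkeys : dd.keys = dd.items.map (fun p => p.1) := rfl
    have hcong : (fun a => pvGetPrior a == (i : Int)) = (fun a => altCat a == i) := by
      funext a; rw [pvGetPrior_eq_cast, beq_cast_nat]
    rw [hkeys, hcong, List.filter_map, List.map_map]
    simp only [Function.comp_def]
    have : ∀ p ∈ dd.items.filter (fun p => altCat p.1 == i),
        (p.1, dd.getD p.1 "") = id p := by
      intro p hp
      have hpm : p ∈ dd.items := List.mem_of_mem_filter hp
      have : dd.getD p.1 "" = p.2 := by
        rcases p with ⟨k, v⟩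
        exact PySem.Dict.getD_of_mem_items dd hpm hnd ""
      simp [this, id]
    rw [List.map_congr_left this, List.map_id]
  have e0 := per 0
  have e1 := per 1
  have e2 := per 2
  have e3 := per 3
  norm_num at e0 e1 e2 e3 ⊢
  rw [e0, e1, e2, e3]

-- ===== VERDICT (by name: the statement is the Claim_ definition above) =====
theorem sort_filemap_spec : Claim_equal_sort_filemap := by
  intro data _
  unfold Spec_sort_filemap
  exact sort_filemap_eq_alt data
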